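-- pv_equiv track=rewrite | github.com/vukse95/PA_ZAD3 | Zadatak3/Zadatak3.py | proveri_pobedu
-- ===== SOURCE A (Python) =====
-- def proveri_pobedu(i,h):
--     igrac=0
--     delilac=0
--     #redom se deli i igracu i deliocu isti broj karata
--     while(i<(h-(h-i)%2)):
--         if(deck[i]==1 and igrac<=10):
--                 igrac+=11
--         else:
--             igrac+=deck[i]
--         if(deck[i+1]==1 and delilac<=10):
--                 delilac+=11
--         else:
--             delilac+=deck[i+1]
--         i+=2
--
--     #ako je broj karata koji se izvlaci neparan, poslednju kartu igrac ce izvuci samo ako zbog nje nece izgubiti, sto zna u napred jer mu je raspored karata poznat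
--     if((h-i)%2!=0):
--         if(deck[h]==1 and igrac<=10):
--             igrac+=11
--         else:
--             if(igrac+deck[h]<=21):
--                 igrac+=deck[h]
--             else:
--                 if(deck[h]==1 and delilac<=10):
--                     delilac+=11
--                 else:
--                     #ako delilac ima bolji rezultat od igraca, nema razloga da izvlaci kartu cime dolazi do greske jer kartu niko nije izvukao
--                     if(delilac>igrac):
--                         return -2
--                     else:
--                         delilac+=deck[h]
--     #provera da li je podeljeno dovoljno karata
--     if(igrac<17 or delilac<17):
--         return -2
--     #provera da li je podeljeno previse karata
--     if(igrac>21 and delilac>21):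
--         return -2
--     if(igrac>21):
--         return -1
--     if(delilac>21):
--         return 1
--     if(igrac>delilac):
--         return 1
--     if(igrac==delilac):
--         return 0
--     if(igrac<delilac):
--         return -1
--
-- deck = [1, 2, 3, 4, 5, 6, 7, 8, 9, 10, 10, 10, 10,
--         1, 2, 3, 4, 5, 6, 7, 8, 9, 10, 10, 10, 10,
--         1, 2, 3, 4, 5, 6, 7, 8, 9, 10, 10, 10, 10,
--         1, 2, 3, 4, 5, 6, 7, 8, 9, 10, 10, 10, 10];
-- ===== SOURCE B (Python) =====
-- deck = [1, 2, 3, 4, 5, 6, 7, 8, 9, 10, 10, 10, 10,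
--         1, 2, 3, 4, 5, 6, 7, 8, 9, 10, 10, 10, 10,
--         1, 2, 3, 4, 5, 6, 7, 8, 9, 10, 10, 10, 10,
--         1, 2, 3, 4, 5, 6, 7, 8, 9, 10, 10, 10, 10]
--
--
-- def hand_total(cards):
--     # closed form of the running score: every card counts its face value,
--     # plus 10 extra for the first ace iff the plain sum before it is <= 10
--     # (once the total exceeds 10 it never drops back, so at most the first
--     # ace can ever be promoted to 11).
--     total = sum(cards)
--     if 1 in cards:
--         k = cards.index(1)
--         if sum(cards[:k]) <= 10:
--             total += 10
--     return total
--
--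
-- def proveri_pobedu(i, h):
--     bound = h - (h - i) % 2
--     igrac = hand_total([deck[j] for j in range(i, bound, 2)])
--     delilac = hand_total([deck[j] for j in range(i + 1, bound, 2)])
--     if (h - i) % 2 != 0:
--         c = deck[h]
--         if c == 1 and igrac <= 10:
--             igrac += 11
--         elif igrac + c <= 21:
--             igrac += c
--         elif c == 1 and delilac <= 10:
--             delilac += 11
--         elif delilac > igrac:
--             return -2
--         else:
--             delilac += c
--     if igrac < 17 or delilac < 17 or (igrac > 21 and delilac > 21):
--         return -2
--     if igrac > 21:
--         return -1
--     if delilac > 21: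
--         return 1
--     return (igrac > delilac) - (igrac < delilac)
-- ===== Notes on version B (the rewrite author's own statement) =====
-- stated objective: alternative
-- what changed: A scores each hand by a fused interleaved loop whose running total decides whether each ace is 11 or 1; B scores a hand in closed form -- plain sum of faces plus 10 for the first ace iff the sum of the cards before it is <= 10 (only the first ace can ever be promoted, since the total never decreases) -- computed with sum/in/index/slice over the two dealt card lists, plus a flat verdict with comparison arithmetic.
import Mathlib
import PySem

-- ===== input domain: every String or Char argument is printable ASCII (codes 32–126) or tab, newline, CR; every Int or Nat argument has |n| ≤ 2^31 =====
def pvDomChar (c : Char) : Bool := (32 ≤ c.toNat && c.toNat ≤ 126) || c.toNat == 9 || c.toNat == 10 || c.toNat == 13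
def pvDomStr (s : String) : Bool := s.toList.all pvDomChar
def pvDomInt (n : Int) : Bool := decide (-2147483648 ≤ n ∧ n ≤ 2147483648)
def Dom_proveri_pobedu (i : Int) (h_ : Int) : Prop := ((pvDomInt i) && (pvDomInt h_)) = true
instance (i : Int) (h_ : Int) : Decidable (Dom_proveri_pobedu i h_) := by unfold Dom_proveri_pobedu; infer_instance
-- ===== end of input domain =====

-- B replaces A's fused running-total dealing loop by a closed-form scorer
-- (plain sum + 10 for the first ace iff the sum before it is ≤ 10) applied to
-- the player's and dealer's card lists (objective: alternative algorithm, not faster).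

-- module-level constant `deck` shared by both Pythons
def pvDeck : List Int :=
  [1, 2, 3, 4, 5, 6, 7, 8, 9, 10, 10, 10, 10,
   1, 2, 3, 4, 5, 6, 7, 8, 9, 10, 10, 10, 10,
   1, 2, 3, 4, 5, 6, 7, 8, 9, 10, 10, 10, 10,
   1, 2, 3, 4, 5, 6, 7, 8, 9, 10, 10, 10, 10]

-- ===== PORT A =====
-- A's while loop; returns (igrac, delilac, final i).  deck[j] is exact inside Pre_ (index in range).
def pvLoopA (h i igrac delilac : Int) : Int × Int × Int :=
  if hlt : i < h - PySem.Int.mod (h - i) 2 then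
    let ig := if PySem.List.pyGetD pvDeck i 0 = 1 ∧ igrac ≤ 10
              then igrac + 11 else igrac + PySem.List.pyGetD pvDeck i 0
    let de := if PySem.List.pyGetD pvDeck (i + 1) 0 = 1 ∧ delilac ≤ 10
              then delilac + 11 else delilac + PySem.List.pyGetD pvDeck (i + 1) 0
    pvLoopA h (i + 2) ig de
  else (igrac, delilac, i)
termination_by (h - i).toNat
decreasing_by
  have := PySem.Int.mod_nonneg (h - i) (b := 2) (by omega)
  omega

-- A's trailing return ladder
def pvTailA (igrac delilac : Int) : Int :=
  if igrac < 17 ∨ delilac < 17 then -2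
  else if igrac > 21 ∧ delilac > 21 then -2
  else if igrac > 21 then -1
  else if delilac > 21 then 1
  else if igrac > delilac then 1
  else if igrac = delilac then 0
  else -1

def proveri_pobedu (i : Int) (h_ : Int) : Int :=
  let r := pvLoopA h_ i 0 0
  let igrac := r.1
  let delilac := r.2.1
  let i2 := r.2.2
  if PySem.Int.mod (h_ - i2) 2 ≠ 0 then
    if PySem.List.pyGetD pvDeck h_ 0 = 1 ∧ igrac ≤ 10 then pvTailA (igrac + 11) delilac
    else
      if igrac + PySem.List.pyGetD pvDeck h_ 0 ≤ 21 then
        pvTailA (igrac + PySem.List.pyGetD pvDeck h_ 0) delilac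
      else
        if PySem.List.pyGetD pvDeck h_ 0 = 1 ∧ delilac ≤ 10 then pvTailA igrac (delilac + 11)
        else
          if delilac > igrac then -2
          else pvTailA igrac (delilac + PySem.List.pyGetD pvDeck h_ 0)
  else pvTailA igrac delilac

-- ===== PORT B =====
-- closed-form hand score: sum of faces + 10 for the first ace iff the sum before it is ≤ 10
def pvHandTotal (cards : List Int) : Int :=
  let total := cards.sum
  match PySem.List.index? cards 1 with        -- `if 1 in cards: k = cards.index(1)`
  | none => total
  | some k =>
    if (PySem.List.slice cards none (some (k : Int))).sum ≤ 10 then total + 10 else total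

def pvVerdict (p d : Int) : Int :=
  if p < 17 ∨ d < 17 ∨ (p > 21 ∧ d > 21) then -2
  else if p > 21 then -1
  else if d > 21 then 1
  else (if p > d then 1 else 0) - (if p < d then 1 else 0)

def proveri_pobedu_alt (i : Int) (h_ : Int) : Int :=
  let bound := h_ - PySem.Int.mod (h_ - i) 2
  let igrac := pvHandTotal ((PySem.List.pyRange i bound 2).map (fun j => PySem.List.pyGetD pvDeck j 0))
  let delilac := pvHandTotal ((PySem.List.pyRange (i + 1) bound 2).map (fun j => PySem.List.pyGetD pvDeck j 0))
  if PySem.Int.mod (h_ - i) 2 ≠ 0 then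
    let c := PySem.List.pyGetD pvDeck h_ 0
    if c = 1 ∧ igrac ≤ 10 then pvVerdict (igrac + 11) delilac
    else if igrac + c ≤ 21 then pvVerdict (igrac + c) delilac
    else if c = 1 ∧ delilac ≤ 10 then pvVerdict igrac (delilac + 11)
    else if delilac > igrac then -2
    else pvVerdict igrac (delilac + c)
  else pvVerdict igrac delilac

-- ===== PRECONDITION & SPEC =====
-- Pre_ is exactly the set of inputs on which Python A returns (outside it A raises IndexError:
-- a dealt index or deck[h] falls outside the 52-card deck; Python's negative-index wraparound
-- down to -52 stays INSIDE Pre_ and is matched).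
def Pre_proveri_pobedu (i : Int) (h_ : Int) : Prop :=
  (i < h_ - PySem.Int.mod (h_ - i) 2 → -52 ≤ i ∧ h_ - PySem.Int.mod (h_ - i) 2 ≤ 52) ∧
  (PySem.Int.mod (h_ - i) 2 ≠ 0 → -52 ≤ h_ ∧ h_ ≤ 51)
instance (i : Int) (h_ : Int) : Decidable (Pre_proveri_pobedu i h_) := by
  unfold Pre_proveri_pobedu; infer_instance

def pvWitness_proveri_pobedu : Int × Int := (0, 51)

def Spec_proveri_pobedu (i : Int) (h_ : Int) (out : Int) : Prop := out = proveri_pobedu_alt i h_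
instance (i : Int) (h_ : Int) (out : Int) : Decidable (Spec_proveri_pobedu i h_ out) := by
  unfold Spec_proveri_pobedu; infer_instance

-- ===== CLAIM (what is proved, stated in full; the proofs are below) =====
def Claim_equal_proveri_pobedu : Prop := ∀ (i : Int) (h_ : Int), Dom_proveri_pobedu i h_ → Pre_proveri_pobedu i h_ → Spec_proveri_pobedu i h_ (proveri_pobedu i h_)

-- ===== LEMMAS AND PROOFS =====

-- A's card accumulator, as a fold
def pvFoldA (t : Int) (cs : List Int) : Int :=
  cs.foldl (fun t c => if c = 1 ∧ t ≤ 10 then t + 11 else t + c) t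

-- `(h-i) % 2` is invariant under i += 2
lemma pv_mod_step (h i : Int) :
    PySem.Int.mod (h - (i + 2)) 2 = PySem.Int.mod (h - i) 2 := by
  rw [PySem.Int.mod_eq_emod_of_pos (by omega), PySem.Int.mod_eq_emod_of_pos (by omega)]
  omega

lemma pv_range2_nil (a b : Int) (hab : b ≤ a) : PySem.List.pyRange a b 2 = [] := by
  rw [PySem.List.pyRange_of_pos _ _ (by omega)]
  simp [if_neg (by omega : ¬ a < b)]

lemma pv_range2_cons (a b : Int) (hab : a < b) :
    PySem.List.pyRange a b 2 = a :: PySem.List.pyRange (a + 2) b 2 := by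
  rw [PySem.List.pyRange_of_pos _ _ (by omega : (0:Int) < 2),
      PySem.List.pyRange_of_pos _ _ (by omega : (0:Int) < 2)]
  rw [if_pos hab]
  by_cases h2 : a + 2 < b
  · rw [if_pos h2]
    have : ((b - a + 2 - 1) / 2).toNat = ((b - (a + 2) + 2 - 1) / 2).toNat + 1 := by omega
    rw [this, List.range_succ_eq_map, List.map_cons, List.map_map]
    refine congrArg₂ List.cons (by simp) ?_
    apply List.map_congr_left
    intro k _
    simp only [Function.comp]
    push_cast
    ring
  · rw [if_neg h2]
    have : ((b - a + 2 - 1) / 2).toNat = 1 := by omega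
    rw [this]
    simp

-- the loop of A computes the two folds over the dealt index ranges, and preserves (h - i) % 2
lemma pv_loopA_eq (h i igrac delilac : Int) :
    pvLoopA h i igrac delilac =
      (pvFoldA igrac ((PySem.List.pyRange i (h - PySem.Int.mod (h - i) 2) 2).map
          (fun j => PySem.List.pyGetD pvDeck j 0)),
       pvFoldA delilac ((PySem.List.pyRange (i + 1) (h - PySem.Int.mod (h - i) 2) 2).map
          (fun j => PySem.List.pyGetD pvDeck j 0)),
       (pvLoopA h i igrac delilac).2.2) ∧
    PySem.Int.mod (h - (pvLoopA h i igrac delilac).2.2) 2 = PySem.Int.mod (h - i) 2 := by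
  fun_induction pvLoopA h i igrac delilac with
  | case1 i igrac delilac hlt ig de ih =>
    have hm := pv_mod_step h i
    have hmnn := PySem.Int.mod_nonneg (h - i) (b := 2) (by omega)
    have hmlt := PySem.Int.mod_lt (h - i) (b := 2) (by omega)
    have hev : PySem.Int.mod (h - i) 2 = (h - i) % 2 :=
      PySem.Int.mod_eq_emod_of_pos (by omega)
    have h1lt : i + 1 < h - PySem.Int.mod (h - i) 2 := by omega
    rw [pv_range2_cons i _ hlt, pv_range2_cons (i + 1) _ h1lt]
    simp only [List.map_cons, pvFoldA, List.foldl_cons]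
    have harr : i + 1 + 2 = i + 2 + 1 := by ring
    rw [harr] at *
    constructor
    · refine Prod.ext ?_ (Prod.ext ?_ rfl)
      · have := (ih.1)
        rw [hm] at this
        simpa [ig, de, pvFoldA] using congrArg Prod.fst this
      · have := (ih.1)
        rw [hm] at this
        simpa [ig, de, pvFoldA] using congrArg (fun p => p.2.1) this
    · rw [ih.2, hm]
  | case2 i igrac delilac hlt =>
    have hmnn := PySem.Int.mod_nonneg (h - i) (b := 2) (by omega)
    have hev : PySem.Int.mod (h - i) 2 = (h - i) % 2 :=
      PySem.Int.mod_eq_emod_of_pos (by omega)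
    rw [pv_range2_nil _ _ (by omega), pv_range2_nil _ _ (by omega)]
    simp [pvFoldA]

-- with no ace in the hand the fold just adds face values
lemma pv_foldA_no_ace (cs : List Int) (t : Int) (hnm : (1:Int) ∉ cs) :
    pvFoldA t cs = t + cs.sum := by
  induction cs generalizing t with
  | nil => simp [pvFoldA]
  | cons c cs ih =>
    have hcond : ¬ (c = 1 ∧ t ≤ 10) := by rintro ⟨rfl, -⟩; exact hnm (by simp)
    have hrec := ih (t + c) (fun h => hnm (List.mem_cons_of_mem _ h))
    simp only [pvFoldA, List.foldl_cons, if_neg hcond]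
    simp only [pvFoldA] at hrec
    rw [hrec, List.sum_cons]
    ring

-- once the running total exceeds 10 (cards nonnegative) the fold just adds face values
lemma pv_foldA_high (cs : List Int) (t : Int) (hnn : ∀ c ∈ cs, 0 ≤ c) (ht : 10 < t) :
    pvFoldA t cs = t + cs.sum := by
  induction cs generalizing t with
  | nil => simp [pvFoldA]
  | cons c cs ih =>
    have hc : 0 ≤ c := hnn c (by simp)
    have hcond : ¬ (c = 1 ∧ t ≤ 10) := by omega
    have hrec := ih (t + c) (fun x hx => hnn x (List.mem_cons_of_mem _ hx)) (by omega)
    simp only [pvFoldA, List.foldl_cons, if_neg hcond]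
    simp only [pvFoldA] at hrec
    rw [hrec, List.sum_cons]
    ring

-- the closed form: with first ace at position k, the fold = sum + 10 iff the sum before it is small
lemma pv_foldA_closed_some (cs : List Int) (t : Int) (k : Nat)
    (hnn : ∀ c ∈ cs, 0 ≤ c) (ht : 0 ≤ t) (hk : PySem.List.index? cs 1 = some k) :
    pvFoldA t cs =
      if t + (cs.take k).sum ≤ 10 then t + cs.sum + 10 else t + cs.sum := by
  induction cs generalizing t k with
  | nil => simp [PySem.List.index?] at hk
  | cons c cs ih =>
    have hc : 0 ≤ c := hnn c (by simp)
    have hnn' : ∀ x ∈ cs, 0 ≤ x := fun x hx => hnn x (by simp [hx])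
    by_cases hc1 : c = 1
    · subst hc1
      rw [PySem.List.index?_cons_self] at hk
      obtain rfl : k = 0 := (Option.some.injEq _ _).mp hk |>.symm
      unfold pvFoldA
      rw [List.foldl_cons, List.take_zero, List.sum_nil, List.sum_cons]
      by_cases ht10 : t ≤ 10
      · rw [if_pos (⟨rfl, ht10⟩ : (1:Int) = 1 ∧ t ≤ 10)]
        have hrec := pv_foldA_high cs (t + 11) hnn' (by omega)
        simp only [pvFoldA] at hrec
        rw [hrec, if_pos (by omega : t + 0 ≤ 10)]
        ring
      · rw [if_neg (by omega : ¬ ((1:Int) = 1 ∧ t ≤ 10))]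
        have hrec := pv_foldA_high cs (t + 1) hnn' (by omega)
        simp only [pvFoldA] at hrec
        rw [hrec, if_neg (by omega : ¬ t + 0 ≤ 10)]
        ring
    · rw [PySem.List.index?_cons_of_ne cs hc1] at hk
      cases hk' : PySem.List.index? cs 1 with
      | none => rw [hk'] at hk; simp at hk
      | some k' =>
        rw [hk'] at hk
        simp only [Option.map_some, Option.some.injEq] at hk
        subst hk
        have hcond : ¬ (c = 1 ∧ t ≤ 10) := fun h => hc1 h.1
        have hrec := ih (t + c) k' hnn' (by omega) hk'
        simp only [pvFoldA, List.foldl_cons, if_neg hcond]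
        simp only [pvFoldA] at hrec
        rw [hrec, List.take_succ_cons, List.sum_cons, List.sum_cons]
        split_ifs <;> omega

-- every card value fetched from the deck is nonnegative
lemma pv_getD_nonneg (j : Int) : 0 ≤ PySem.List.pyGetD pvDeck j 0 := by
  by_cases hr : PySem.Raise.InRange pvDeck.length j
  · have hm := PySem.List.pyGetD_mem (xs := pvDeck) (i := j) (d := 0) hr
    have hall : ∀ x ∈ pvDeck, (0:Int) ≤ x := by decide
    exact hall _ hm
  · have hnone : PySem.List.pyGet? pvDeck j = none :=
      (PySem.List.pyGet?_eq_none_iff (xs := pvDeck) (i := j)).mpr hr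
    rw [PySem.List.pyGetD_of_none pvDeck j 0 hnone]

-- B's closed-form scorer equals A's fold on nonnegative cards
lemma pv_handTotal_eq_foldA (cs : List Int) (hnn : ∀ c ∈ cs, 0 ≤ c) :
    pvHandTotal cs = pvFoldA 0 cs := by
  unfold pvHandTotal
  cases hk : PySem.List.index? cs 1 with
  | none =>
    rw [pv_foldA_no_ace cs 0 ((PySem.List.index?_eq_none_iff cs 1).mp hk)]
    simp
  | some k =>
    rw [pv_foldA_closed_some cs 0 k hnn le_rfl hk]
    show (if (PySem.List.slice cs none (some (k:Int))).sum ≤ 10 then cs.sum + 10 else cs.sum) = _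
    rw [PySem.List.slice_to_natCast]
    simp

-- A's return ladder and B's verdict agree
lemma pv_tail_eq (p d : Int) : pvTailA p d = pvVerdict p d := by
  unfold pvTailA pvVerdict
  split_ifs <;> omega

-- ===== VERDICT (by name: the statement is the Claim_ definition above) =====
theorem proveri_pobedu_spec : Claim_equal_proveri_pobedu := by
  intro i h_ _ _
  unfold Spec_proveri_pobedu proveri_pobedu proveri_pobedu_alt
  obtain ⟨heq, hmod⟩ := pv_loopA_eq h_ i 0 0
  rw [heq]
  simp only [hmod]
  rw [pv_handTotal_eq_foldA _ (by intro c hc; obtain ⟨j, _, rfl⟩ := List.mem_map.mp hc; exact pv_getD_nonneg j),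
      pv_handTotal_eq_foldA _ (by intro c hc; obtain ⟨j, _, rfl⟩ := List.mem_map.mp hc; exact pv_getD_nonneg j)]
  rw [pv_tail_eq, pv_tail_eq, pv_tail_eq, pv_tail_eq, pv_tail_eq]
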